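-- pv_equiv track=rewrite | github.com/GraphicDThanh/training-hub | backend/python/python/think-python-2/13-pr2-data-structure/exercise-7.py | split_word_by_escape
-- ===== SOURCE A (Python) =====
-- from string import punctuation
--
-- def split_word_by_escape(word):
--     """split word by escape to list word
--
--         :param word: string
--         :return: list of words
--     """
--     escape_string = punctuation + '“——’’0123456789'
--     is_not_exist_escape = True
--
--     word = word.lower()
--
--     for char in escape_string:
--         if char in word:
--             is_not_exist_escape = False
--             for word in word.split(char):
--                 return split_word_by_escape(word)
--
--     if is_not_exist_escape:
--         return word
-- ===== SOURCE B (Python) =====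
-- from string import punctuation
--
--
-- def split_word_by_escape(word):
--     """split word by escape to list word
--
--         :param word: string
--         :return: list of words
--     """
--     escapes = set(punctuation + '“——’’0123456789')
--     word = word.lower()
--     out = []
--     for ch in word:
--         if ch in escapes:
--             break
--         out.append(ch)
--     return ''.join(out)
-- ===== Notes on version B (the rewrite author's own statement) =====
-- stated objective: simpler
-- what changed: Replaces A's recursion (rescan the whole escape alphabet over the word, re-split and recurse on the prefix) with a single left-to-right pass over the lowered word that stops at the first escape character, using a set for the membership test.
import Mathlib
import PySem

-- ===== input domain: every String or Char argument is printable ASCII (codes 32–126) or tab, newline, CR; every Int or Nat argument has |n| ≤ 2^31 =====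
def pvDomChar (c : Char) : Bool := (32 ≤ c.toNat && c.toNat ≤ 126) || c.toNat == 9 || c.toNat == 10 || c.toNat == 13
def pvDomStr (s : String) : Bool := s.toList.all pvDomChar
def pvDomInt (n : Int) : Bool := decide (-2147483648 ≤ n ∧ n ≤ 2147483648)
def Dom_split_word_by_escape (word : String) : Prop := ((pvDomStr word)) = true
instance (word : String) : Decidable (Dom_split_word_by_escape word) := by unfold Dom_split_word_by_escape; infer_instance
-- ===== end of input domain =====

-- B replaces A's alphabet-rescan/split/recurse scheme with one left-to-right pass over the
-- lowered word that stops at the first escape character (objective: simpler).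


-- ===== PORT A =====
-- escape_string = string.punctuation + '“——’’0123456789'
def pvEscapeChars : List Char := "!\"#$%&'()*+,-./:;<=>?@[\\]^_`{|}~“——’’0123456789".toList

-- The next three lemmas characterise the first piece of str.split(sep) for a one-char sep;
-- pvGoA cites pv_splitOn_headI / pv_length_takeWhile_lt by name in its decreasing_by.
theorem pv_splitOn_go_acc (sep : List Char) (f : Nat) :
    ∀ (l cur : List Char) (acc : List (List Char)),
      PySem.Chars.splitOn.go sep f l cur acc = acc.reverse ++ PySem.Chars.splitOn.go sep f l cur [] := by
  induction f with
  | zero => intro l cur acc; rw [PySem.Chars.splitOn.go, PySem.Chars.splitOn.go]; simp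
  | succ f ih =>
    intro l cur acc
    cases l with
    | nil =>
      rw [PySem.Chars.splitOn.go, PySem.Chars.splitOn.go]
      all_goals simp
    | cons c rest =>
      rw [PySem.Chars.splitOn.go, PySem.Chars.splitOn.go]
      by_cases hp : sep.isPrefixOf (c :: rest)
      · simp only [hp, if_true]
        rw [ih _ [] (cur.reverse :: acc), ih _ [] [cur.reverse]]
        simp
      · simp only [hp, Bool.false_eq_true, if_false]
        rw [ih rest (c :: cur) acc]

theorem pv_splitOn_go_head (c : Char) :
    ∀ (l : List Char) (f : Nat) (cur : List Char), l.length < f →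
      ∃ rest, PySem.Chars.splitOn.go [c] f l cur [] =
        (cur.reverse ++ l.takeWhile (fun a => a ≠ c)) :: rest := by
  intro l
  induction l with
  | nil =>
    intro f cur hf
    cases f with
    | zero => omega
    | succ f =>
      rw [PySem.Chars.splitOn.go]
      · exact ⟨[], by simp⟩
      all_goals simp
  | cons a t ih =>
    intro f cur hf
    cases f with
    | zero => omega
    | succ f =>
      rw [PySem.Chars.splitOn.go]
      by_cases hac : a = c
      · have hp : List.isPrefixOf [c] (a :: t) = true := by simp [List.isPrefixOf, hac]
        simp only [hp, if_true]
        rw [pv_splitOn_go_acc]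
        refine ⟨PySem.Chars.splitOn.go [c] f (List.drop [c].length (a :: t)) [] [], ?_⟩
        simp [hac]
      · have hp : List.isPrefixOf [c] (a :: t) = false := by
          simp [List.isPrefixOf]; exact fun h => hac h.symm
        simp only [hp, Bool.false_eq_true, if_false]
        obtain ⟨rest, hrest⟩ := ih f (a :: cur) (by simpa using Nat.lt_of_succ_lt_succ hf)
        refine ⟨rest, ?_⟩
        rw [hrest]
        simp [hac]

theorem pv_splitOn_headI (w : List Char) (c : Char) :
    (PySem.Chars.splitOn w [c]).headI = w.takeWhile (fun a => a ≠ c) := by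
  obtain ⟨rest, h⟩ := pv_splitOn_go_head c w (w.length + 1) [] (Nat.lt_succ_self _)
  unfold PySem.Chars.splitOn
  rw [h]; simp

theorem pv_length_takeWhile_lt (w : List Char) (c : Char) (hc : c ∈ w) :
    (w.takeWhile (fun a => a ≠ c)).length < w.length := by
  induction w with
  | nil => cases hc
  | cons a t ih =>
    by_cases hac : a = c
    · simp [hac]
    · have hct : c ∈ t := by cases hc with
        | head => exact absurd rfl hac
        | tail _ h => exact h
      simp only [List.takeWhile_cons, hac, decide_not]
      simpa [decide_not] using Nat.succ_lt_succ (ih hct)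

-- literal port of A: lower the word; scan escape_string for the first char contained in it;
-- if found, recurse on the first piece of word.split(char) (a split is never empty, so the
-- inner `for … return` returns on the first piece); otherwise return the lowered word.
def pvGoA (cs : List Char) : List Char :=
  match hfind : List.find? (fun c => PySem.Chars.isIn [c] (PySem.Chars.lower cs)) pvEscapeChars with
  | some c => pvGoA ((PySem.Chars.splitOn (PySem.Chars.lower cs) [c]).headI)
  | none => PySem.Chars.lower cs
termination_by cs.length
decreasing_by
  have hc : PySem.Chars.isIn [c] (PySem.Chars.lower cs) = true := by
    simpa using List.find?_some hfind
  have hmem : c ∈ PySem.Chars.lower cs :=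
    (List.singleton_infix_iff c _).mp ((PySem.Chars.isIn_iff_infix _ _).mp hc)
  rw [pv_splitOn_headI]
  calc ((PySem.Chars.lower cs).takeWhile (fun a => a ≠ c)).length
      < (PySem.Chars.lower cs).length := pv_length_takeWhile_lt _ c hmem
    _ = cs.length := by simp [PySem.Chars.lower]

def split_word_by_escape (word : String) : String :=
  String.ofList (pvGoA word.toList)

-- ===== PORT B =====
def pvEscapes : PySem.Set Char := PySem.Set.ofList pvEscapeChars

-- literal port of B: one pass over the lowered word, keep chars until the first escape char
def pvGoB : List Char → List Char
  | [] => []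
  | a :: rest => if PySem.Set.contains pvEscapes a then [] else a :: pvGoB rest

def split_word_by_escape_alt (word : String) : String :=
  String.ofList (pvGoB (PySem.Chars.lower word.toList))

-- ===== PRECONDITION & SPEC =====
def Spec_split_word_by_escape (word : String) (out : String) : Prop := out = split_word_by_escape_alt word
instance (word : String) (out : String) : Decidable (Spec_split_word_by_escape word out) := by unfold Spec_split_word_by_escape; infer_instance

-- ===== CLAIM (what is proved, stated in full; the proofs are below) =====
def Claim_equal_split_word_by_escape : Prop := ∀ (word : String), Dom_split_word_by_escape word → Spec_split_word_by_escape word (split_word_by_escape word)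

-- ===== LEMMAS AND PROOFS =====

def pvQ (a : Char) : Bool := !PySem.Set.contains pvEscapes a

theorem pvQ_false_of_mem {c : Char} (h : c ∈ pvEscapeChars) : pvQ c = false := by
  simp only [pvQ, Bool.not_eq_false']
  exact (PySem.Set.contains_iff _ _).mpr ((PySem.Set.mem_ofList _ _).mpr h)

theorem pv_goB_eq_takeWhile (l : List Char) : pvGoB l = l.takeWhile pvQ := by
  induction l with
  | nil => rfl
  | cons a t ih =>
    by_cases h : a ∈ pvEscapes
    · simp [pvGoB, h, pvQ, PySem.Set.contains]
    · simp [pvGoB, h, pvQ, PySem.Set.contains, ih]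

theorem pv_takeWhile_takeWhile (p q : Char → Bool) (l : List Char) :
    (l.takeWhile q).takeWhile p = l.takeWhile (fun a => q a && p a) := by
  induction l with
  | nil => rfl
  | cons a t ih =>
    by_cases hq : q a <;> by_cases hp : p a <;> simp [hq, hp, ih]

theorem pv_lowerChar_idem (c : Char) :
    PySem.Chars.lowerChar (PySem.Chars.lowerChar c) = PySem.Chars.lowerChar c := by
  simp only [PySem.Chars.lowerChar, PySem.Chars.isupper]
  split_ifs with h1 h2 <;> try rfl
  exfalso
  simp only [Bool.and_eq_true, decide_eq_true_eq] at h1 h2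
  have h1a : 65 ≤ c.toNat := Fin.mk_le_mk.mp h1.1
  have h1b : c.toNat ≤ 90 := Fin.mk_le_mk.mp h1.2
  have hv : (c.toNat + 32).isValidChar := by left; omega
  have ht : (Char.ofNat (c.toNat + 32)).toNat = c.toNat + 32 := by
    simp [Char.ofNat, hv, Char.ofNatAux]; omega
  have h2b : (Char.ofNat (c.toNat + 32)).toNat ≤ 90 := Fin.mk_le_mk.mp h2.2
  omega

-- lower is idempotent, so the prefix A recurses on is already lowered
theorem pv_lower_takeWhile_lower (p : Char → Bool) (cs : List Char) :
    PySem.Chars.lower ((PySem.Chars.lower cs).takeWhile p) = (PySem.Chars.lower cs).takeWhile p := by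
  simp only [PySem.Chars.lower, List.takeWhile_map, List.map_map]
  congr 1
  funext c
  exact pv_lowerChar_idem c

-- A's result is the maximal escape-free prefix of the lowered word
theorem pv_goA_eq (n : Nat) : ∀ (cs : List Char), cs.length ≤ n →
    pvGoA cs = (PySem.Chars.lower cs).takeWhile pvQ := by
  induction n with
  | zero =>
    intro cs hn
    have hcs : cs = [] := List.eq_nil_of_length_eq_zero (Nat.le_zero.mp hn)
    subst hcs
    rw [pvGoA]
    split
    · next c hfind =>
      exfalso
      have hc : PySem.Chars.isIn [c] (PySem.Chars.lower []) = true := by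
        simpa using List.find?_some hfind
      have : c ∈ PySem.Chars.lower ([] : List Char) :=
        (List.singleton_infix_iff c _).mp ((PySem.Chars.isIn_iff_infix _ _).mp hc)
      simp [PySem.Chars.lower] at this
    · rfl
  | succ n ih =>
    intro cs hn
    rw [pvGoA]
    split
    · next c hfind =>
      have hc : PySem.Chars.isIn [c] (PySem.Chars.lower cs) = true := by
        simpa using List.find?_some hfind
      have hcmemesc : c ∈ pvEscapeChars := List.mem_of_find?_eq_some hfind
      have hmem : c ∈ PySem.Chars.lower cs :=
        (List.singleton_infix_iff c _).mp ((PySem.Chars.isIn_iff_infix _ _).mp hc)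
      rw [pv_splitOn_headI]
      have hlen : ((PySem.Chars.lower cs).takeWhile (fun a => a ≠ c)).length ≤ n := by
        have h1 := pv_length_takeWhile_lt (PySem.Chars.lower cs) c hmem
        have h2 : (PySem.Chars.lower cs).length = cs.length := by
          simp [PySem.Chars.lower]
        omega
      have hfun : (fun a => decide (a ≠ c) && pvQ a) = pvQ := by
        funext a
        by_cases hq : pvQ a
        · have hac : a ≠ c := by
            intro h; rw [h] at hq; rw [pvQ_false_of_mem hcmemesc] at hq; exact Bool.false_ne_true hq
          rw [hq, Bool.and_true, decide_eq_true_eq]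
          exact hac
        · have hq' : pvQ a = false := by simpa using hq
          rw [hq', Bool.and_false]
      rw [ih _ hlen, pv_lower_takeWhile_lower, pv_takeWhile_takeWhile, hfun]
    · next hfind =>
      have hall := List.find?_eq_none.mp hfind
      symm
      apply List.takeWhile_eq_self_iff.mpr
      intro a ha
      simp only [pvQ, Bool.not_eq_eq_eq_not, Bool.not_true]
      by_cases hmem : a ∈ pvEscapeChars
      · exfalso
        have hna := hall a hmem
        exact hna ((PySem.Chars.isIn_iff_infix _ _).mpr ((List.singleton_infix_iff a _).mpr ha))
      · cases hco : pvEscapes.contains a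
        · rfl
        · exact (hmem ((PySem.Set.mem_ofList _ _).mp ((PySem.Set.contains_iff _ _).mp hco))).elim

-- ===== VERDICT (by name: the statement is the Claim_ definition above) =====
theorem split_word_by_escape_spec : Claim_equal_split_word_by_escape := by
  intro word _
  unfold Spec_split_word_by_escape split_word_by_escape split_word_by_escape_alt
  rw [pv_goA_eq word.toList.length word.toList (Nat.le_refl _), pv_goB_eq_takeWhile]
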